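-- pv_equiv track=rewrite | github.com/LEEJINSUNG123/- | 03_algorithm/0809/전기버스.py | f
-- ===== SOURCE A (Python) =====
-- def f(arr, k, n, m):
--     arr = [0] + arr + [n]  # 출발점과 도착점 추가
--     last = 0  # 마지막 충전한 충전소 번호
--     cnt = 0  # 충전 횟수
--
--     for i in range(1, m + 2):
--         # 충전기 사이가 K보다 크면 충전할 수 없음
--         if arr[i] - arr[i-1] > k:
--             return 0
--         # 충전할 수 없는 경우 앞쪽에서 충전해야 함
--         if arr[i] > last + k:
--             last = arr[i-1]
--             cnt += 1
--     return cnt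
-- ===== SOURCE B (Python) =====
-- def count_charges(legs, last, k):
--     """Charges needed to drive the legs starting freshly charged at `last`:
--     find the first stop that is out of range, charge just before it, recurse."""
--     for t, (a, b) in enumerate(legs):
--         if b > last + k:
--             return 1 + count_charges(legs[t + 1:], a, k)
--     return 0
--
--
-- def f(arr, k, n, m):
--     stops = [0] + arr + [n]
--     legs = [(stops[i], stops[i + 1]) for i in range(m + 1)]
--     if any(b - a > k for a, b in legs):
--         return 0
--     return count_charges(legs, 0, k)
-- ===== Notes on version B (the rewrite author's own statement) =====
-- stated objective: alternative
-- what changed: Replaces A's single indexed loop with fused early-return and two mutable accumulators by a feasibility test over the route's legs (any leg longer than k means 0) followed by a recursion that counts one charge per first-unreachable stop, recursing on the remaining legs with no cnt/last state; Pre_ excludes m > len(arr), where A in general raises IndexError (though its early gap-exit can still return 0 before reaching the bad index, where B, building all m+1 legs up front, raises).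
-- outside the precondition, e.g. on f([100, 3, 9, 6], 3, 4, 9): A returns 0, B raises IndexError
import Mathlib
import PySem

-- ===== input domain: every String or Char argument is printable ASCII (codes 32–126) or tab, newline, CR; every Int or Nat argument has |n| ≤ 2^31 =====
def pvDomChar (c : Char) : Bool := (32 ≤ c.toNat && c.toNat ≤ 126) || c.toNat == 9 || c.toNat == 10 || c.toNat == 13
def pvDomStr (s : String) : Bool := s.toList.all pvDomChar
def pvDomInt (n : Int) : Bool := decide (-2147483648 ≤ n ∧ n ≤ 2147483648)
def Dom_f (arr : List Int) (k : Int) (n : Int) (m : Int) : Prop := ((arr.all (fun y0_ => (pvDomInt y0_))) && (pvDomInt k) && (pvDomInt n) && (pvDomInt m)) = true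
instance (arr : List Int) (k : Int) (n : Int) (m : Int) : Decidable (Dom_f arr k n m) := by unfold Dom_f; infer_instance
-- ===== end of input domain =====

-- B: a feasibility test over the route's legs followed by a recursion counting one
-- charge per first-unreachable stop, instead of A's fused indexed loop with two
-- mutable accumulators and an early return.

-- ===== PORT A =====
-- the 'for i in range(1, m+2)' loop with its early 'return 0'; pyGet? = none (IndexError) is excluded by Pre_
def fAux (ext : List Int) (k : Int) : List Int → Int → Int → Int
  | [], _, cnt => cnt
  | i :: rest, last, cnt =>
    match PySem.List.pyGet? ext i, PySem.List.pyGet? ext (i - 1) with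
    | some ai, some aim1 =>
      if ai - aim1 > k then 0
      else if ai > last + k then fAux ext k rest aim1 (cnt + 1)
      else fAux ext k rest last cnt
    | _, _ => 0

def f (arr : List Int) (k : Int) (n : Int) (m : Int) : Int :=
  fAux ([0] ++ arr ++ [n]) k (PySem.List.pyRange 1 (m + 2) 1) 0 0

-- ===== PORT B =====
-- Source B's count_charges: the for-with-early-return becomes structural recursion
-- (the slice legs[t+1:] is exactly the list remaining at step t)
def countCharges (legs : List (Int × Int)) (last : Int) (k : Int) : Int :=
  match legs with
  | [] => 0
  | (a, b) :: rest =>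
    if b > last + k then 1 + countCharges rest a k
    else countCharges rest last k

-- stops[i] is in range for every i drawn from range(m+1) whenever Pre_ holds, so .getD 0 is never taken
def f_alt (arr : List Int) (k : Int) (n : Int) (m : Int) : Int :=
  let stops : List Int := [0] ++ arr ++ [n]
  let legs : List (Int × Int) := (PySem.List.pyRange 0 (m + 1) 1).map
      (fun i => ((PySem.List.pyGet? stops i).getD 0, (PySem.List.pyGet? stops (i + 1)).getD 0))
  if legs.any (fun p => p.2 - p.1 > k) then 0 else countCharges legs 0 k

-- ===== PRECONDITION & SPEC =====
-- Pre_ excludes m > arr.length, where A in general raises IndexError; on some of those A's early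
-- gap-exit still returns 0 before reaching the bad index, while B, building all m+1 legs up front, raises.
def Pre_f (arr : List Int) (k : Int) (n : Int) (m : Int) : Prop := m ≤ arr.length
instance (arr : List Int) (k : Int) (n : Int) (m : Int) : Decidable (Pre_f arr k n m) := by unfold Pre_f; infer_instance
def pvWitness_f : List Int × Int × Int × Int := ([2, 4], 3, 6, 2)

def Spec_f (arr : List Int) (k : Int) (n : Int) (m : Int) (out : Int) : Prop := out = f_alt arr k n m
instance (arr : List Int) (k : Int) (n : Int) (m : Int) (out : Int) : Decidable (Spec_f arr k n m out) := by unfold Spec_f; infer_instance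

-- ===== CLAIM (what is proved, stated in full; the proofs are below) =====
def Claim_equal_f : Prop := ∀ (arr : List Int) (k : Int) (n : Int) (m : Int), Dom_f arr k n m → Pre_f arr k n m → Spec_f arr k n m (f arr k n m)

-- ===== LEMMAS AND PROOFS =====

-- reference recursion over the consecutive pairs, matching A's fused loop
def gRef (k : Int) : List (Int × Int) → Int → Int → Int
  | [], _, cnt => cnt
  | (a, b) :: ps, last, cnt =>
    if b - a > k then 0
    else if b > last + k then gRef k ps a (cnt + 1)
    else gRef k ps last cnt

lemma fAux_eq_gRef (ext : List Int) (k : Int) :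
    ∀ (ps : List (Int × Int)) (i : Int) (last cnt : Int),
      (∀ t : Nat, (ht : t < ps.length) →
        PySem.List.pyGet? ext (i + t) = some (ps[t]).2 ∧
        PySem.List.pyGet? ext (i + t - 1) = some (ps[t]).1) →
      fAux ext k (PySem.List.pyRange i (i + ps.length) 1) last cnt = gRef k ps last cnt := by
  intro ps
  induction ps with
  | nil =>
    intro i last cnt _
    rw [show i + (([] : List (Int × Int)).length : Int) = i by simp,
        PySem.List.pyRange_one_eq_nil (le_refl i)]
    rfl
  | cons p ps ih =>
    intro i last cnt h
    have hlen : i < i + ((p :: ps).length : Int) := by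
      simp only [List.length_cons]; push_cast; omega
    rw [PySem.List.pyRange_one_cons hlen]
    have h0 := h 0 (by simp)
    simp only [List.getElem_cons_zero] at h0
    have h0a : PySem.List.pyGet? ext i = some p.2 := by simpa using h0.1
    have h0b : PySem.List.pyGet? ext (i - 1) = some p.1 := by
      have := h0.2; simpa using this
    have hrange : PySem.List.pyRange (i + 1) (i + ((p :: ps).length : Int)) 1
        = PySem.List.pyRange (i + 1) ((i + 1) + (ps.length : Int)) 1 := by
      congr 1; simp; omega
    have hrec : ∀ (last' cnt' : Int),
        fAux ext k (PySem.List.pyRange (i + 1) ((i + 1) + (ps.length : Int)) 1) last' cnt'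
          = gRef k ps last' cnt' := by
      intro last' cnt'
      apply ih
      intro t ht
      have h1 := h (t + 1) (by simpa using Nat.succ_lt_succ ht)
      constructor
      · have := h1.1
        simpa [show i + 1 + (t : Int) = i + ((t : Int) + 1) by ring, Int.add_comm] using this
      · have := h1.2
        simpa [show i + 1 + (t : Int) - 1 = i + ((t : Int) + 1) - 1 by ring] using this
    obtain ⟨a, b⟩ := p
    simp only [fAux, h0a, h0b, gRef, hrange]
    split_ifs with h1 h2
    · rfl
    · exact hrec a (cnt + 1)
    · exact hrec last cnt

lemma gRef_of_bad (k : Int) :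
    ∀ (ps : List (Int × Int)) (last cnt : Int),
      (∃ p ∈ ps, p.2 - p.1 > k) → gRef k ps last cnt = 0 := by
  intro ps
  induction ps with
  | nil => intro _ _ h; simp at h
  | cons p ps ih =>
    intro last cnt h
    obtain ⟨a, b⟩ := p
    simp only [gRef]
    split_ifs with h1 h2
    · rfl
    · rcases h with ⟨q, hq, hqk⟩
      rcases List.mem_cons.mp hq with rfl | hq'
      · exact absurd hqk (by simpa using h1)
      · exact ih a (cnt + 1) ⟨q, hq', hqk⟩
    · rcases h with ⟨q, hq, hqk⟩
      rcases List.mem_cons.mp hq with rfl | hq'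
      · exact absurd hqk (by simpa using h1)
      · exact ih last cnt ⟨q, hq', hqk⟩

lemma gRef_eq_count (k : Int) :
    ∀ (ps : List (Int × Int)) (last cnt : Int),
      (∀ p ∈ ps, ¬ p.2 - p.1 > k) →
      gRef k ps last cnt = cnt + countCharges ps last k := by
  intro ps
  induction ps with
  | nil => intro _ _ _; simp [gRef, countCharges]
  | cons p ps ih =>
    intro last cnt h
    obtain ⟨a, b⟩ := p
    have hab : ¬ b - a > k := h (a, b) (List.mem_cons_self)
    have hrest : ∀ q ∈ ps, ¬ q.2 - q.1 > k := fun q hq => h q (List.mem_cons_of_mem _ hq)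
    simp only [gRef, countCharges, if_neg hab]
    by_cases h2 : b > last + k
    · rw [if_pos h2, if_pos h2, ih a (cnt + 1) hrest]; ring
    · rw [if_neg h2, if_neg h2, ih last cnt hrest]

-- ===== VERDICT (by name: the statement is the Claim_ definition above) =====
theorem f_spec : Claim_equal_f := by
  intro arr k n m _ hpre
  have hmlen : m ≤ (arr.length : Int) := hpre
  unfold Spec_f f f_alt
  set ext : List Int := [0] ++ arr ++ [n] with hext
  have hextlen : ext.length = arr.length + 2 := by simp [hext]
  by_cases hm0 : 0 ≤ m
  case neg =>
    rw [PySem.List.pyRange_one_eq_nil (show (m : Int) + 2 ≤ 1 by omega),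
        PySem.List.pyRange_one_eq_nil (show (m : Int) + 1 ≤ 0 by omega)]
    simp [fAux, countCharges]
  set fn : Int → Int × Int := fun i =>
      ((PySem.List.pyGet? ext i).getD 0, (PySem.List.pyGet? ext (i + 1)).getD 0) with hfn
  set legs : List (Int × Int) := (PySem.List.pyRange 0 (m + 1) 1).map fn with hlegs
  have hlen : legs.length = (m + 1).toNat := by
    simp [hlegs, PySem.List.length_pyRange_one]
  have hgetE : ∀ t : Nat, t < ext.length →
      PySem.List.pyGet? ext (t : Int) = some (ext.getD t 0) := by
    intro t ht
    rw [PySem.List.pyGet?_natCast, List.getElem?_eq_getElem ht, List.getD_eq_getElem ext 0 ht]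
  have hconv : PySem.List.pyRange 0 (m + 1) 1 = PySem.List.pyRange 0 (((m + 1).toNat : Int)) 1 := by
    congr 1; omega
  have hget : ∀ t : Nat, (ht : t < legs.length) →
      legs[t] = (ext.getD t 0, ext.getD (t + 1) 0) := by
    intro t ht
    have ht' : t < (m + 1).toNat := by rw [hlen] at ht; exact ht
    have hb1 : t < ext.length := by rw [hextlen]; omega
    have hb2 : t + 1 < ext.length := by rw [hextlen]; omega
    have hsome : legs[t]? = some (fn (t : Int)) := by
      rw [hlegs, hconv]
      exact PySem.List.getElem?_map_pyRange_zero fn (m + 1).toNat t ht'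
    have hval : legs[t] = fn (t : Int) := by
      have hg := List.getElem?_eq_getElem ht
      rw [hg] at hsome
      exact Option.some.inj hsome
    rw [hval, hfn]
    have e1 := hgetE t hb1
    have e2 : PySem.List.pyGet? ext ((t : Int) + 1) = some (ext.getD (t + 1) 0) := by
      have hc : ((t : Int) + 1) = ((t + 1 : Nat) : Int) := by push_cast; ring
      rw [hc]
      exact hgetE (t + 1) hb2
    simp [e1, e2]
  have hidx : ∀ t : Nat, (ht : t < legs.length) →
      PySem.List.pyGet? ext (1 + t) = some (legs[t]).2 ∧
      PySem.List.pyGet? ext (1 + t - 1) = some (legs[t]).1 := by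
    intro t ht
    have ht' : t < (m + 1).toNat := by rw [hlen] at ht; exact ht
    have hb1 : t < ext.length := by rw [hextlen]; omega
    have hb2 : t + 1 < ext.length := by rw [hextlen]; omega
    rw [hget t ht]
    constructor
    · have hc : (1 : Int) + t = ((t + 1 : Nat) : Int) := by push_cast; ring
      rw [hc]
      exact hgetE (t + 1) hb2
    · have hc : (1 : Int) + t - 1 = ((t : Nat) : Int) := by push_cast; ring
      rw [hc]
      exact hgetE t hb1
  have hrange : PySem.List.pyRange 1 (m + 2) 1
      = PySem.List.pyRange 1 (1 + (legs.length : Int)) 1 := by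
    congr 1; rw [hlen]; omega
  rw [hrange, fAux_eq_gRef ext k legs 1 0 0 hidx]
  by_cases hbad : ∃ p ∈ legs, p.2 - p.1 > k
  · have hany : (legs.any fun p => decide (p.2 - p.1 > k)) = true := by
      rw [List.any_eq_true]
      obtain ⟨p, hp, hpk⟩ := hbad
      exact ⟨p, hp, by simpa using hpk⟩
    rw [gRef_of_bad k _ 0 0 hbad, if_pos hany]
  · push_neg at hbad
    have hany : (legs.any fun p => decide (p.2 - p.1 > k)) = false := by
      rw [List.any_eq_false]
      intro p hp
      simpa using hbad p hp
    rw [gRef_eq_count k _ 0 0 (fun p hp => not_lt.mpr (hbad p hp)), if_neg (by rw [hany]; simp)]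
    rw [zero_add]
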